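-- pv_equiv track=rewrite | github.com/jayasurya-n/Leetcode | Daily_Problems/2024/July/q12.py | findMaxGain
-- ===== SOURCE A (Python) =====
-- def findMaxGain(s,x,y,ch1,ch2):
--     # x,y = 4,5
--     # ch1,ch2 = a,b
--     stack = []
--     ans=0
--     if(x>y):
--         x,y = y,x
--         ch1,ch2 = ch2,ch1
--
--     for i in range(len(s)):
--         if(stack and s[i]==ch1 and stack[-1]==ch2):
--             stack.pop()
--             ans+=y
--         else:stack.append(s[i])
--
--     new_stack = []
--
--     for i in range(len(stack)):
--         if(new_stack and stack[i]==ch2 and new_stack[-1]==ch1):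
--             new_stack.pop()
--             ans+=x
--         else:new_stack.append(stack[i])
--     return ans
-- ===== SOURCE B (Python) =====
-- def findMaxGain(s, x, y, ch1, ch2):
--     if x > y:
--         x, y = y, x
--         ch1, ch2 = ch2, ch1
--     a = b = ans = 0
--     for c in s:
--         if c == ch1 and b > 0:
--             b -= 1
--             ans += y
--         elif c == ch2:
--             b += 1
--         elif c == ch1:
--             a += 1
--         else:
--             ans += min(a, b) * x
--             a = b = 0
--     return ans + min(a, b) * x
-- ===== Notes on version B (the rewrite author's own statement) =====
-- stated objective: simpler
-- what changed: Replaces A's two explicit stack passes (build a stack removing ch2-ch1 pairs, then rescan it removing ch1-ch2 pairs) by a single counting pass over the string with two integer counters (unmatched ch1 / unmatched ch2) that are flushed as min(a,b)*x at every foreign character and once at the end.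
import Mathlib
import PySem

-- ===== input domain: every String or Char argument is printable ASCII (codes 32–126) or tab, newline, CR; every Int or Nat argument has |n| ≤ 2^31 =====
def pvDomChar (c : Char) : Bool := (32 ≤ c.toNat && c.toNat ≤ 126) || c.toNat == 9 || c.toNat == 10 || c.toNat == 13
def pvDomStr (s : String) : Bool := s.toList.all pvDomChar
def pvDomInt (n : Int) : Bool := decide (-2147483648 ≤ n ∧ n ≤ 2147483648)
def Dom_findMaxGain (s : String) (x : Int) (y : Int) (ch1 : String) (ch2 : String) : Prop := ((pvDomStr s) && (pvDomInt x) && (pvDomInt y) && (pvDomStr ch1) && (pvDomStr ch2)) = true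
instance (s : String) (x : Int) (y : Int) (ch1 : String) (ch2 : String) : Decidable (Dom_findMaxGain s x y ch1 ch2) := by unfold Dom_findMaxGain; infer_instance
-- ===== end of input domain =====

-- B replaces A's two explicit stack passes by a single counting pass (two integer
-- counters flushed at every non-ch1/ch2 character); equivalence of the return values
-- is proved for all inputs (objective: simpler/alternative, no speed claim).

-- ===== PORT A =====
-- Python's `if x>y: swap` prologue, shared verbatim by both ports.
def pvSwap (x y : Int) (ch1 ch2 : String) : Int × Int × String × String :=
  if x > y then (y, x, ch2, ch1) else (x, y, ch1, ch2)

-- `stack and stack[-1]==t` (stack kept with its top at the head).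
def pvTop (st : List Char) (t : String) : Bool :=
  match st with
  | [] => false
  | c :: _ => String.singleton c == t

-- first loop body: `if stack and s[i]==ch1 and stack[-1]==ch2: pop; ans+=y else: append`
def pvStepA1 (ch1 ch2 : String) (y : Int) (st : List Char × Int) (c : Char) : List Char × Int :=
  if !st.1.isEmpty && (String.singleton c == ch1) && pvTop st.1 ch2
  then (st.1.tail, st.2 + y) else (c :: st.1, st.2)

-- second loop body: `if new_stack and stack[i]==ch2 and new_stack[-1]==ch1: pop; ans+=x else: append`
def pvStepA2 (ch1 ch2 : String) (x : Int) (st : List Char × Int) (c : Char) : List Char × Int :=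
  if !st.1.isEmpty && (String.singleton c == ch2) && pvTop st.1 ch1
  then (st.1.tail, st.2 + x) else (c :: st.1, st.2)

-- the two passes (the second traverses the first stack bottom-to-top = reverse)
def coreA (ch1 ch2 : String) (x y : Int) (l : List Char) : Int :=
  let p1 := l.foldl (pvStepA1 ch1 ch2 y) ([], 0)
  (p1.1.reverse.foldl (pvStepA2 ch1 ch2 x) ([], p1.2)).2

def findMaxGain (s : String) (x : Int) (y : Int) (ch1 : String) (ch2 : String) : Int :=
  coreA (pvSwap x y ch1 ch2).2.2.1 (pvSwap x y ch1 ch2).2.2.2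
        (pvSwap x y ch1 ch2).1 (pvSwap x y ch1 ch2).2.1 s.toList

-- ===== PORT B =====
-- single pass: state (a, b, ans) = (unmatched ch1 count, unmatched ch2 count, score)
def pvStepB (ch1 ch2 : String) (x y : Int) (st : Int × Int × Int) (c : Char) : Int × Int × Int :=
  if (String.singleton c == ch1) && decide (st.2.1 > 0) then (st.1, st.2.1 - 1, st.2.2 + y)
  else if String.singleton c == ch2 then (st.1, st.2.1 + 1, st.2.2)
  else if String.singleton c == ch1 then (st.1 + 1, st.2.1, st.2.2)
  else (0, 0, st.2.2 + min st.1 st.2.1 * x)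

def coreB (ch1 ch2 : String) (x y : Int) (l : List Char) : Int :=
  let r := l.foldl (pvStepB ch1 ch2 x y) (0, 0, 0)
  r.2.2 + min r.1 r.2.1 * x

def findMaxGain_alt (s : String) (x : Int) (y : Int) (ch1 : String) (ch2 : String) : Int :=
  coreB (pvSwap x y ch1 ch2).2.2.1 (pvSwap x y ch1 ch2).2.2.2
        (pvSwap x y ch1 ch2).1 (pvSwap x y ch1 ch2).2.1 s.toList

-- ===== PRECONDITION & SPEC =====
def Spec_findMaxGain (s : String) (x : Int) (y : Int) (ch1 : String) (ch2 : String) (out : Int) : Prop := out = findMaxGain_alt s x y ch1 ch2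
instance (s : String) (x : Int) (y : Int) (ch1 : String) (ch2 : String) (out : Int) : Decidable (Spec_findMaxGain s x y ch1 ch2 out) := by unfold Spec_findMaxGain; infer_instance

-- ===== CLAIM (what is proved, stated in full; the proofs are below) =====
def Claim_equal_findMaxGain : Prop := ∀ (s : String) (x : Int) (y : Int) (ch1 : String) (ch2 : String), Dom_findMaxGain s x y ch1 ch2 → Spec_findMaxGain s x y ch1 ch2 (findMaxGain s x y ch1 ch2)

-- ===== LEMMAS AND PROOFS =====

-- `s[i] == t` for a one-character string t
theorem pv_singleton_beq {t : String} {d : Char} (h : t.toList = [d]) (c : Char) :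
    (String.singleton c == t) = (c == d) := by
  by_cases hc : c = d
  · subst hc
    have ht : t = String.singleton c := String.toList_injective (by simp [h])
    simp [ht]
  · have h2 : (c == d) = false := by simp [hc]
    rw [h2, beq_eq_false_iff_ne]
    intro heq
    apply hc
    have := congrArg String.toList heq
    simpa [h] using this

theorem pv_singleton_beq_false {t : String} (h : t.toList.length ≠ 1) (c : Char) :
    (String.singleton c == t) = false := by
  rw [beq_eq_false_iff_ne]
  intro heq
  apply h
  rw [← heq]
  simp

def pvTopC (st : List Char) (t : Char) : Bool :=
  match st with
  | [] => false
  | c :: _ => c == t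

theorem pvTop_char {t : String} {e : Char} (h : t.toList = [e]) (st : List Char) :
    pvTop st t = pvTopC st e := by
  cases st <;> simp [pvTop, pvTopC, pv_singleton_beq h]

theorem pvTop_false {t : String} (h : t.toList.length ≠ 1) (st : List Char) :
    pvTop st t = false := by
  cases st <;> simp [pvTop, pv_singleton_beq_false h]

-- char-level versions of the step functions
def stA1 (d e : Char) (y : Int) (st : List Char × Int) (c : Char) : List Char × Int :=
  if !st.1.isEmpty && (c == d) && pvTopC st.1 e
  then (st.1.tail, st.2 + y) else (c :: st.1, st.2)

def stA2 (d e : Char) (x : Int) (st : List Char × Int) (c : Char) : List Char × Int :=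
  if !st.1.isEmpty && (c == e) && pvTopC st.1 d
  then (st.1.tail, st.2 + x) else (c :: st.1, st.2)

theorem stepA1_char {ch1 ch2 : String} {d e : Char} (h1 : ch1.toList = [d]) (h2 : ch2.toList = [e])
    (y : Int) : pvStepA1 ch1 ch2 y = stA1 d e y := by
  funext st c
  unfold pvStepA1 stA1
  rw [pv_singleton_beq h1, pvTop_char h2]

theorem stepA2_char {ch1 ch2 : String} {d e : Char} (h1 : ch1.toList = [d]) (h2 : ch2.toList = [e])
    (x : Int) : pvStepA2 ch1 ch2 x = stA2 d e x := by
  funext st c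
  unfold pvStepA2 stA2
  rw [pv_singleton_beq h2, pvTop_char h1]

-- ---------- case A : ch1 is not a single character ----------
theorem caseA_pass1 {ch1 ch2 : String} (h : ch1.toList.length ≠ 1) (y : Int) :
    ∀ (l : List Char) (st : List Char) (ans : Int),
      l.foldl (pvStepA1 ch1 ch2 y) (st, ans) = (l.reverse ++ st, ans) := by
  intro l
  induction l with
  | nil => intro st ans; simp
  | cons c t ih =>
      intro st ans
      have hc : pvStepA1 ch1 ch2 y (st, ans) c = (c :: st, ans) := by
        unfold pvStepA1
        rw [pv_singleton_beq_false h]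
        simp
      simp only [List.foldl_cons, hc, ih]
      simp

theorem caseA_pass2 {ch1 ch2 : String} (h : ch1.toList.length ≠ 1) (x : Int) :
    ∀ (l : List Char) (ns : List Char) (ans : Int),
      l.foldl (pvStepA2 ch1 ch2 x) (ns, ans) = (l.reverse ++ ns, ans) := by
  intro l
  induction l with
  | nil => intro ns ans; simp
  | cons c t ih =>
      intro ns ans
      have hc : pvStepA2 ch1 ch2 x (ns, ans) c = (c :: ns, ans) := by
        unfold pvStepA2
        rw [pvTop_false h]
        simp
      simp only [List.foldl_cons, hc, ih]
      simp

theorem caseA_B {ch1 ch2 : String} (h : ch1.toList.length ≠ 1) (x y : Int) :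
    ∀ (l : List Char) (b ans : Int), 0 ≤ b →
      ∃ b', l.foldl (pvStepB ch1 ch2 x y) (0, b, ans) = (0, b', ans) ∧ 0 ≤ b' := by
  intro l
  induction l with
  | nil => intro b ans hb; exact ⟨b, rfl, hb⟩
  | cons c t ih =>
      intro b ans hb
      by_cases h2 : (String.singleton c == ch2) = true
      · have hc : pvStepB ch1 ch2 x y (0, b, ans) c = (0, b + 1, ans) := by
          unfold pvStepB
          rw [pv_singleton_beq_false h, h2]
          simp
        rw [List.foldl_cons, hc]
        exact ih (b + 1) ans (by omega)
      · have hmin : min (0 : Int) b = 0 := by omega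
        have hc : pvStepB ch1 ch2 x y (0, b, ans) c = (0, 0, ans) := by
          unfold pvStepB
          rw [pv_singleton_beq_false h, Bool.eq_false_iff.mpr h2]
          simp [hmin]
        rw [List.foldl_cons, hc]
        exact ih 0 ans le_rfl

theorem caseA {ch1 ch2 : String} (h : ch1.toList.length ≠ 1) (x y : Int) (l : List Char) :
    coreA ch1 ch2 x y l = coreB ch1 ch2 x y l := by
  obtain ⟨b', hb', hb0⟩ := @caseA_B ch1 ch2 h x y l 0 0 le_rfl
  have hmin : min (0 : Int) b' = 0 := by omega
  simp [coreA, coreB, caseA_pass1 h, caseA_pass2 h, hb', hmin]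

-- ---------- case B : ch1 = [d], ch2 not a single character ----------
theorem caseB_pass1 {ch1 ch2 : String} (h : ch2.toList.length ≠ 1) (y : Int) :
    ∀ (l : List Char) (st : List Char) (ans : Int),
      l.foldl (pvStepA1 ch1 ch2 y) (st, ans) = (l.reverse ++ st, ans) := by
  intro l
  induction l with
  | nil => intro st ans; simp
  | cons c t ih =>
      intro st ans
      have hc : pvStepA1 ch1 ch2 y (st, ans) c = (c :: st, ans) := by
        unfold pvStepA1
        rw [pvTop_false h]
        simp
      simp only [List.foldl_cons, hc, ih]
      simp

theorem caseB_pass2 {ch1 ch2 : String} (h : ch2.toList.length ≠ 1) (x : Int) :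
    ∀ (l : List Char) (ns : List Char) (ans : Int),
      l.foldl (pvStepA2 ch1 ch2 x) (ns, ans) = (l.reverse ++ ns, ans) := by
  intro l
  induction l with
  | nil => intro ns ans; simp
  | cons c t ih =>
      intro ns ans
      have hc : pvStepA2 ch1 ch2 x (ns, ans) c = (c :: ns, ans) := by
        unfold pvStepA2
        rw [pv_singleton_beq_false h]
        simp
      simp only [List.foldl_cons, hc, ih]
      simp

theorem caseB_B {ch1 ch2 : String} (h : ch2.toList.length ≠ 1) (x y : Int) :
    ∀ (l : List Char) (a ans : Int), 0 ≤ a →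
      ∃ a', l.foldl (pvStepB ch1 ch2 x y) (a, 0, ans) = (a', 0, ans) ∧ 0 ≤ a' := by
  intro l
  induction l with
  | nil => intro a ans ha; exact ⟨a, rfl, ha⟩
  | cons c t ih =>
      intro a ans ha
      by_cases h1 : (String.singleton c == ch1) = true
      · have hc : pvStepB ch1 ch2 x y (a, 0, ans) c = (a + 1, 0, ans) := by
          unfold pvStepB
          rw [pv_singleton_beq_false h, h1]
          simp
        rw [List.foldl_cons, hc]
        exact ih (a + 1) ans (by omega)
      · have hmin : min a (0 : Int) = 0 := by omega
        have hc : pvStepB ch1 ch2 x y (a, 0, ans) c = (0, 0, ans) := by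
          unfold pvStepB
          rw [pv_singleton_beq_false h, Bool.eq_false_iff.mpr h1]
          simp [hmin]
        rw [List.foldl_cons, hc]
        exact ih 0 ans le_rfl

theorem caseB {ch1 ch2 : String} (h : ch2.toList.length ≠ 1) (x y : Int) (l : List Char) :
    coreA ch1 ch2 x y l = coreB ch1 ch2 x y l := by
  obtain ⟨a', ha', ha0⟩ := @caseB_B ch1 ch2 h x y l 0 0 le_rfl
  have hmin : min a' (0 : Int) = 0 := by omega
  simp [coreA, coreB, caseB_pass1 h, caseB_pass2 h, ha', hmin]

-- ---------- shared ℕ-counter machine for cases C and D ----------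
def stBN (d e : Char) (x y : Int) (m : ℕ × ℕ × Int) (c : Char) : ℕ × ℕ × Int :=
  if c = d ∧ 0 < m.2.1 then (m.1, m.2.1 - 1, m.2.2 + y)
  else if c = e then (m.1, m.2.1 + 1, m.2.2)
  else if c = d then (m.1 + 1, m.2.1, m.2.2)
  else (0, 0, m.2.2 + (↑(min m.1 m.2.1) : Int) * x)

theorem stepB_cast {ch1 ch2 : String} {d e : Char} (h1 : ch1.toList = [d]) (h2 : ch2.toList = [e])
    (x y : Int) (a b : ℕ) (ans : Int) (c : Char) :
    pvStepB ch1 ch2 x y ((a : Int), (b : Int), ans) c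
      = (((stBN d e x y (a, b, ans) c).1 : Int),
         ((stBN d e x y (a, b, ans) c).2.1 : Int),
         (stBN d e x y (a, b, ans) c).2.2) := by
  unfold pvStepB stBN
  simp only [pv_singleton_beq h1, pv_singleton_beq h2, Bool.and_eq_true, beq_iff_eq,
    decide_eq_true_eq, gt_iff_lt, Int.natCast_pos]
  split_ifs with p q r <;>
    first
      | rfl
      | (refine Prod.ext ?_ (Prod.ext ?_ ?_) <;> simp <;> omega)

theorem foldB_cast {ch1 ch2 : String} {d e : Char} (h1 : ch1.toList = [d]) (h2 : ch2.toList = [e])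
    (x y : Int) :
    ∀ (l : List Char) (a b : ℕ) (ans : Int),
      l.foldl (pvStepB ch1 ch2 x y) ((a : Int), (b : Int), ans)
        = ((((l.foldl (stBN d e x y) (a, b, ans)).1 : ℕ) : Int),
           (((l.foldl (stBN d e x y) (a, b, ans)).2.1 : ℕ) : Int),
           (l.foldl (stBN d e x y) (a, b, ans)).2.2) := by
  intro l
  induction l with
  | nil => intro a b ans; rfl
  | cons c t ih =>
      intro a b ans
      rw [List.foldl_cons, List.foldl_cons, stepB_cast h1 h2 x y a b ans c]
      exact ih (stBN d e x y (a, b, ans) c).1 (stBN d e x y (a, b, ans) c).2.1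
        (stBN d e x y (a, b, ans) c).2.2

-- ---------- case C : ch1 = ch2 = [d] ----------
def NoDD (d : Char) (l : List Char) : Prop := l.IsChain (fun p q => ¬(p = d ∧ q = d))

theorem caseC_pass1 (d : Char) (x y : Int) :
    ∀ (l : List Char) (st : List Char) (ans : Int), NoDD d st →
      NoDD d (l.foldl (stA1 d d y) (st, ans)).1 ∧
      l.foldl (stBN d d x y) (0, (if st.head? = some d then 1 else 0), ans)
        = (0, (if (l.foldl (stA1 d d y) (st, ans)).1.head? = some d then 1 else 0),
           (l.foldl (stA1 d d y) (st, ans)).2) := by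
  intro l
  induction l with
  | nil => intro st ans h; exact ⟨h, rfl⟩
  | cons c t ih =>
      intro st ans h
      rw [List.foldl_cons, List.foldl_cons]
      rcases st with _ | ⟨s0, st'⟩
      · have hstep : stA1 d d y (([] : List Char), ans) c = ([c], ans) := by
          unfold stA1; simp
        have hB : stBN d d x y (0, (if (List.head? ([] : List Char)) = some d then 1 else 0), ans) c
            = (0, (if ([c].head?) = some d then 1 else 0), ans) := by
          by_cases hcd : c = d <;> simp [stBN, hcd]
        rw [hstep, hB]
        exact ih [c] ans (List.isChain_singleton c)
      · by_cases hcd : c = d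
        · by_cases hs0 : s0 = d
          · have hstep : stA1 d d y ((s0 :: st'), ans) c = (st', ans + y) := by
              unfold stA1; simp [pvTopC, hcd, hs0]
            have hh : st'.head? ≠ some d := by
              rcases st' with _ | ⟨u, ut⟩
              · simp
              · rw [hs0] at h
                have hrel := (List.isChain_cons_cons.mp h).1
                intro hu
                have hu' : u = d := by simpa using hu
                exact hrel ⟨rfl, hu'⟩
            have hB : stBN d d x y (0, (if ((s0 :: st').head?) = some d then 1 else 0), ans) c
                = (0, (if st'.head? = some d then 1 else 0), ans + y) := by
              simp [stBN, hcd, hs0, hh]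
            rw [hstep, hB]
            exact ih st' (ans + y) h.tail
          · have hstep : stA1 d d y ((s0 :: st'), ans) c = (c :: s0 :: st', ans) := by
              unfold stA1; simp [pvTopC, hs0]
            have hB : stBN d d x y (0, (if ((s0 :: st').head?) = some d then 1 else 0), ans) c
                = (0, (if ((c :: s0 :: st').head?) = some d then 1 else 0), ans) := by
              simp [stBN, hcd, hs0]
            rw [hstep, hB]
            refine ih (c :: s0 :: st') ans ?_
            exact List.isChain_cons_cons.mpr ⟨fun hp => hs0 hp.2, h⟩
        · have hstep : stA1 d d y ((s0 :: st'), ans) c = (c :: s0 :: st', ans) := by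
            unfold stA1; simp [hcd]
          have hB : stBN d d x y (0, (if ((s0 :: st').head?) = some d then 1 else 0), ans) c
              = (0, (if ((c :: s0 :: st').head?) = some d then 1 else 0), ans) := by
            by_cases hs0 : s0 = d <;> simp [stBN, hcd, hs0]
          rw [hstep, hB]
          refine ih (c :: s0 :: st') ans ?_
          exact List.isChain_cons_cons.mpr ⟨fun hp => hcd hp.1, h⟩

theorem caseC_pass2 (d : Char) (x : Int) :
    ∀ (l : List Char) (ns : List Char) (ans : Int), NoDD d l →
      ¬(l.head? = some d ∧ ns.head? = some d) →
      l.foldl (stA2 d d x) (ns, ans) = (l.reverse ++ ns, ans) := by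
  intro l
  induction l with
  | nil => intro ns ans _ _; simp
  | cons c t ih =>
      intro ns ans h hpre
      have hstep : stA2 d d x (ns, ans) c = (c :: ns, ans) := by
        unfold stA2
        by_cases hcd : c = d
        · rcases ns with _ | ⟨n0, nt⟩
          · simp
          · have hn0 : n0 ≠ d := by
              intro hn
              exact hpre ⟨by simp [hcd], by simp [hn]⟩
            simp [pvTopC, hn0]
        · simp [hcd]
      rw [List.foldl_cons, hstep, ih (c :: ns) ans h.tail ?_]
      · simp
      · rcases t with _ | ⟨u, ut⟩
        · simp
        · intro hcon
          obtain ⟨hu, hc⟩ := hcon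
          simp only [List.head?_cons, Option.some_inj] at hu hc
          exact (List.isChain_cons_cons.mp h).1 ⟨hc, hu⟩

theorem caseC {ch1 ch2 : String} {d : Char} (h1 : ch1.toList = [d]) (h2 : ch2.toList = [d])
    (x y : Int) (l : List Char) :
    coreA ch1 ch2 x y l = coreB ch1 ch2 x y l := by
  simp only [coreA, coreB]
  rw [stepA1_char h1 h2 y, stepA2_char h1 h2 x]
  obtain ⟨hnodd, hB⟩ := caseC_pass1 d x y l [] 0 List.isChain_nil
  simp only [List.head?_nil] at hB
  have hrevnodd : NoDD d (l.foldl (stA1 d d y) ([], 0)).1.reverse := by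
    rw [NoDD, List.isChain_reverse]
    exact (List.IsChain.iff (fun a b => by tauto)).mp hnodd
  have hpass2 := caseC_pass2 d x (l.foldl (stA1 d d y) ([], 0)).1.reverse [] 
    (l.foldl (stA1 d d y) ([], 0)).2 hrevnodd (by simp)
  rw [hpass2]
  have hcast := foldB_cast h1 h2 x y l 0 0 0
  simp only [Nat.cast_zero] at hcast
  rw [hcast]
  rw [if_neg (by simp : ¬((none : Option Char) = some d))] at hB
  rw [hB]
  by_cases hh : (l.foldl (stA1 d d y) ([], 0)).1.head? = some d <;> simp [hh]

-- ---------- case D : ch1 = [d], ch2 = [e], d ≠ e ----------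
def encS (d e : Char) : List (Char × ℕ × ℕ) → List Char
  | [] => []
  | (f, a, b) :: t => f :: (List.replicate b e ++ (List.replicate a d ++ encS d e t))

def enc (d e : Char) (a b : ℕ) (segs : List (Char × ℕ × ℕ)) : List Char :=
  List.replicate b e ++ (List.replicate a d ++ encS d e segs)

def WFsegs (d e : Char) (segs : List (Char × ℕ × ℕ)) : Prop :=
  ∀ p ∈ segs, p.1 ≠ d ∧ p.1 ≠ e

def msum (segs : List (Char × ℕ × ℕ)) : ℕ := (segs.map (fun p => min p.2.1 p.2.2)).sum

def stMach (d e : Char) (y : Int) (m : ℕ × ℕ × List (Char × ℕ × ℕ) × Int) (c : Char) :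
    ℕ × ℕ × List (Char × ℕ × ℕ) × Int :=
  if c = d then
    (if 0 < m.2.1 then (m.1, m.2.1 - 1, m.2.2.1, m.2.2.2 + y)
     else (m.1 + 1, m.2.1, m.2.2.1, m.2.2.2))
  else if c = e then (m.1, m.2.1 + 1, m.2.2.1, m.2.2.2)
  else (0, 0, (c, m.1, m.2.1) :: m.2.2.1, m.2.2.2)

theorem encTop_ne (d e : Char) (hde : d ≠ e) (a : ℕ) (segs : List (Char × ℕ × ℕ))
    (h : WFsegs d e segs) : pvTopC (enc d e a 0 segs) e = false := by
  cases a with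
  | zero =>
      cases segs with
      | nil => rfl
      | cons p t =>
          obtain ⟨f, pa, pb⟩ := p
          have hf : f ≠ e := (h (f, pa, pb) (List.mem_cons_self)).2
          simp [enc, encS, pvTopC, hf]
  | succ n => simp [enc, List.replicate_succ, pvTopC, hde]

theorem pass1_enc (d e : Char) (hde : d ≠ e) (y : Int) :
    ∀ (l : List Char) (a b : ℕ) (segs : List (Char × ℕ × ℕ)) (ans : Int), WFsegs d e segs →
      l.foldl (stA1 d e y) (enc d e a b segs, ans)
        = (enc d e (l.foldl (stMach d e y) (a, b, segs, ans)).1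
             (l.foldl (stMach d e y) (a, b, segs, ans)).2.1
             (l.foldl (stMach d e y) (a, b, segs, ans)).2.2.1,
           (l.foldl (stMach d e y) (a, b, segs, ans)).2.2.2)
      ∧ WFsegs d e (l.foldl (stMach d e y) (a, b, segs, ans)).2.2.1 := by
  intro l
  induction l with
  | nil => intro a b segs ans hWF; exact ⟨rfl, hWF⟩
  | cons c t ih =>
      intro a b segs ans hWF
      rw [List.foldl_cons, List.foldl_cons]
      by_cases hcd : c = d
      · cases b with
        | zero =>
            have hstep : stA1 d e y (enc d e a 0 segs, ans) c = (enc d e (a + 1) 0 segs, ans) := by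
              unfold stA1
              rw [encTop_ne d e hde a segs hWF]
              simp [hcd, enc, List.replicate_succ]
            have hM : stMach d e y (a, 0, segs, ans) c = (a + 1, 0, segs, ans) := by
              simp [stMach, hcd]
            rw [hstep, hM]
            exact ih (a + 1) 0 segs ans hWF
        | succ b' =>
            have hE : enc d e a (b' + 1) segs = e :: enc d e a b' segs := by
              simp [enc, List.replicate_succ]
            have hstep : stA1 d e y (enc d e a (b' + 1) segs, ans) c
                = (enc d e a b' segs, ans + y) := by
              rw [hE]; unfold stA1; simp [pvTopC, hcd]
            have hM : stMach d e y (a, b' + 1, segs, ans) c = (a, b', segs, ans + y) := by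
              simp [stMach, hcd]
            rw [hstep, hM]
            exact ih a b' segs (ans + y) hWF
      · by_cases hce : c = e
        · have hed : e ≠ d := fun hh => hde hh.symm
          have hstep : stA1 d e y (enc d e a b segs, ans) c
              = (enc d e a (b + 1) segs, ans) := by
            unfold stA1; simp [hce, hed, enc, List.replicate_succ]
          have hM : stMach d e y (a, b, segs, ans) c = (a, b + 1, segs, ans) := by
            simp [stMach, hce, hed]
          rw [hstep, hM]
          exact ih a (b + 1) segs ans hWF
        · have hstep : stA1 d e y (enc d e a b segs, ans) c
              = (enc d e 0 0 ((c, a, b) :: segs), ans) := by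
            unfold stA1; simp [hcd, enc, encS]
          have hM : stMach d e y (a, b, segs, ans) c = (0, 0, (c, a, b) :: segs, ans) := by
            simp [stMach, hcd, hce]
          rw [hstep, hM]
          refine ih 0 0 ((c, a, b) :: segs) ans ?_
          intro p hp
          rcases List.mem_cons.mp hp with hp | hp
          · subst hp; exact ⟨hcd, hce⟩
          · exact hWF p hp

theorem dpush (d e : Char) (hde : d ≠ e) (x : Int) :
    ∀ (a : ℕ) (ns : List Char) (ans : Int),
      (List.replicate a d).foldl (stA2 d e x) (ns, ans) = (List.replicate a d ++ ns, ans) := by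
  intro a
  induction a with
  | zero => intro ns ans; simp
  | succ n ih =>
      intro ns ans
      have hstep : stA2 d e x (ns, ans) d = (d :: ns, ans) := by
        unfold stA2; simp [hde]
      rw [List.replicate_succ, List.foldl_cons, hstep, ih (d :: ns) ans]
      rw [List.append_cons, ← List.replicate_succ', List.replicate_succ, List.cons_append]

theorem efold (d e : Char) (hde : d ≠ e) (x : Int) :
    ∀ (b a : ℕ) (ns : List Char) (ans : Int), ns.head? ≠ some d →
      (List.replicate b e).foldl (stA2 d e x) (List.replicate a d ++ ns, ans)
        = (List.replicate (b - a) e ++ (List.replicate (a - b) d ++ ns),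
           ans + x * (↑(min a b) : Int)) := by
  intro b
  induction b with
  | zero =>
      intro a ns ans _
      simp
  | succ b' ih =>
      intro a ns ans hns
      rw [List.replicate_succ, List.foldl_cons]
      cases a with
      | zero =>
          have hstep : stA2 d e x (List.replicate 0 d ++ ns, ans) e = (e :: ns, ans) := by
            unfold stA2
            rcases ns with _ | ⟨n0, nt⟩
            · simp
            · have hn0 : n0 ≠ d := by simpa using hns
              simp [pvTopC, hn0]
          rw [hstep]
          have := ih 0 (e :: ns) ans (by simp [Ne.symm hde])
          simp only [List.replicate_zero, List.nil_append, Nat.sub_zero, Nat.zero_sub,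
            Nat.min_eq_left (Nat.zero_le _), Nat.cast_zero, mul_zero,
            add_zero] at this ⊢
          rw [this]
          simp [List.replicate_succ']
      | succ a' =>
          have hstep : stA2 d e x (List.replicate (a' + 1) d ++ ns, ans) e
              = (List.replicate a' d ++ ns, ans + x) := by
            unfold stA2; simp [List.replicate_succ, pvTopC]
          rw [hstep, ih a' ns (ans + x) hns]
          rw [Nat.succ_sub_succ, Nat.succ_sub_succ, Nat.succ_min_succ]
          push_cast
          ring_nf

theorem chunk (d e : Char) (hde : d ≠ e) (x : Int) (a b : ℕ) (ns : List Char) (ans : Int)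
    (h : ns.head? ≠ some d) :
    (List.replicate a d ++ List.replicate b e).foldl (stA2 d e x) (ns, ans)
      = (List.replicate (b - a) e ++ (List.replicate (a - b) d ++ ns),
         ans + x * (↑(min a b) : Int)) := by
  rw [List.foldl_append, dpush d e hde x, efold d e hde x b a ns ans h]

theorem segsFold (d e : Char) (hde : d ≠ e) (x : Int) :
    ∀ (segs : List (Char × ℕ × ℕ)) (ans : Int), WFsegs d e segs →
      ∃ ns, ((encS d e segs).reverse).foldl (stA2 d e x) ([], ans)
              = (ns, ans + x * (↑(msum segs) : Int)) ∧ ns.head? ≠ some d := by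
  intro segs
  induction segs with
  | nil =>
      intro ans _
      exact ⟨[], by simp [encS, msum], by simp⟩
  | cons p t ih =>
      intro ans hWF
      obtain ⟨f, pa, pb⟩ := p
      have hf := hWF (f, pa, pb) (List.mem_cons_self)
      obtain ⟨ns0, hfold, hns0⟩ := ih ans (fun q hq => hWF q (List.mem_cons_of_mem _ hq))
      have hrev : (encS d e ((f, pa, pb) :: t)).reverse
          = (encS d e t).reverse ++ (List.replicate pa d ++ List.replicate pb e) ++ [f] := by
        simp [encS, List.reverse_append, List.reverse_replicate, List.append_assoc]
      have hfstep : stA2 d e x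
          (List.replicate (pb - pa) e ++ (List.replicate (pa - pb) d ++ ns0),
           ans + x * (↑(msum t) : Int) + x * (↑(min pa pb) : Int)) f
          = (f :: (List.replicate (pb - pa) e ++ (List.replicate (pa - pb) d ++ ns0)),
             ans + x * (↑(msum t) : Int) + x * (↑(min pa pb) : Int)) := by
        unfold stA2; simp [hf.2]
      refine ⟨f :: (List.replicate (pb - pa) e ++ (List.replicate (pa - pb) d ++ ns0)), ?_,
        by simp [hf.1]⟩
      rw [hrev, List.foldl_append, List.foldl_append, hfold,
        chunk d e hde x pa pb ns0 _ hns0, List.foldl_cons, hfstep, List.foldl_nil]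
      have harith : ans + x * (↑(msum t) : Int) + x * (↑(min pa pb) : Int)
          = ans + x * (↑(msum ((f, pa, pb) :: t)) : Int) := by
        simp only [msum, List.map_cons, List.sum_cons]
        push_cast
        ring
      rw [harith]

theorem stBN_stM (d e : Char) (hde : d ≠ e) (x y : Int) :
    ∀ (l : List Char) (a b : ℕ) (segs : List (Char × ℕ × ℕ)) (ans : Int),
      l.foldl (stBN d e x y) (a, b, ans + (↑(msum segs) : Int) * x)
        = ((l.foldl (stMach d e y) (a, b, segs, ans)).1,
           (l.foldl (stMach d e y) (a, b, segs, ans)).2.1,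
           (l.foldl (stMach d e y) (a, b, segs, ans)).2.2.2
             + (↑(msum (l.foldl (stMach d e y) (a, b, segs, ans)).2.2.1) : Int) * x) := by
  intro l
  induction l with
  | nil => intro a b segs ans; rfl
  | cons c t ih =>
      intro a b segs ans
      rw [List.foldl_cons, List.foldl_cons]
      by_cases hcd : c = d
      · by_cases hb : 0 < b
        · have hB : stBN d e x y (a, b, ans + (↑(msum segs) : Int) * x) c
              = (a, b - 1, (ans + y) + (↑(msum segs) : Int) * x) := by
            simp [stBN, hcd, hb]
            ring
          have hM : stMach d e y (a, b, segs, ans) c = (a, b - 1, segs, ans + y) := by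
            simp [stMach, hcd, hb]
          rw [hB, hM]
          exact ih a (b - 1) segs (ans + y)
        · have hB : stBN d e x y (a, b, ans + (↑(msum segs) : Int) * x) c
              = (a + 1, b, ans + (↑(msum segs) : Int) * x) := by
            simp [stBN, hcd, hb, hde]
          have hM : stMach d e y (a, b, segs, ans) c = (a + 1, b, segs, ans) := by
            simp [stMach, hcd, hb]
          rw [hB, hM]
          exact ih (a + 1) b segs ans
      · by_cases hce : c = e
        · have hed : e ≠ d := fun hh => hde hh.symm
          have hB : stBN d e x y (a, b, ans + (↑(msum segs) : Int) * x) c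
              = (a, b + 1, ans + (↑(msum segs) : Int) * x) := by
            simp [stBN, hce, hed]
          have hM : stMach d e y (a, b, segs, ans) c = (a, b + 1, segs, ans) := by
            simp [stMach, hce, hed]
          rw [hB, hM]
          exact ih a (b + 1) segs ans
        · have hB : stBN d e x y (a, b, ans + (↑(msum segs) : Int) * x) c
              = (0, 0, ans + (↑(msum ((c, a, b) :: segs)) : Int) * x) := by
            simp [stBN, hcd, hce, msum]
            ring
          have hM : stMach d e y (a, b, segs, ans) c = (0, 0, (c, a, b) :: segs, ans) := by
            simp [stMach, hcd, hce]
          rw [hB, hM]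
          exact ih 0 0 ((c, a, b) :: segs) ans

theorem caseD {ch1 ch2 : String} {d e : Char} (h1 : ch1.toList = [d]) (h2 : ch2.toList = [e])
    (hde : d ≠ e) (x y : Int) (l : List Char) :
    coreA ch1 ch2 x y l = coreB ch1 ch2 x y l := by
  simp only [coreA, coreB]
  rw [stepA1_char h1 h2 y, stepA2_char h1 h2 x]
  have h0 : WFsegs d e [] := by intro p hp; cases hp
  obtain ⟨hfold, hWF⟩ := pass1_enc d e hde y l 0 0 [] 0 h0
  have henc0 : enc d e 0 0 [] = ([] : List Char) := rfl
  rw [henc0] at hfold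
  rw [hfold]
  have hrev : (enc d e (l.foldl (stMach d e y) (0, 0, [], 0)).1
        (l.foldl (stMach d e y) (0, 0, [], 0)).2.1 (l.foldl (stMach d e y) (0, 0, [], 0)).2.2.1).reverse
      = (encS d e (l.foldl (stMach d e y) (0, 0, [], 0)).2.2.1).reverse
        ++ (List.replicate (l.foldl (stMach d e y) (0, 0, [], 0)).1 d
            ++ List.replicate (l.foldl (stMach d e y) (0, 0, [], 0)).2.1 e) := by
    simp [enc, List.reverse_append, List.reverse_replicate, List.append_assoc]
  obtain ⟨ns, hseg, hns⟩ := segsFold d e hde x (l.foldl (stMach d e y) (0, 0, [], 0)).2.2.1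
    (l.foldl (stMach d e y) (0, 0, [], 0)).2.2.2 hWF
  rw [hrev, List.foldl_append, hseg,
    chunk d e hde x (l.foldl (stMach d e y) (0, 0, [], 0)).1
      (l.foldl (stMach d e y) (0, 0, [], 0)).2.1 ns _ hns]
  have hcast := foldB_cast h1 h2 x y l 0 0 0
  simp only [Nat.cast_zero] at hcast
  rw [hcast]
  have hBN := stBN_stM d e hde x y l 0 0 [] 0
  simp only [msum, List.map_nil, List.sum_nil, Nat.cast_zero, zero_mul, add_zero] at hBN
  rw [hBN]
  simp only [msum]
  push_cast [Nat.cast_min]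
  ring_nf

-- ---------- the core equivalence and the verdict ----------
theorem core_eq (ch1 ch2 : String) (x y : Int) (l : List Char) :
    coreA ch1 ch2 x y l = coreB ch1 ch2 x y l := by
  by_cases H1 : ch1.toList.length = 1
  · obtain ⟨d, hd⟩ := List.length_eq_one_iff.mp H1
    by_cases H2 : ch2.toList.length = 1
    · obtain ⟨e, he⟩ := List.length_eq_one_iff.mp H2
      by_cases hde : d = e
      · subst hde; exact caseC hd he x y l
      · exact caseD hd he hde x y l
    · exact caseB H2 x y l
  · exact caseA H1 x y l

-- ===== VERDICT (by name: the statement is the Claim_ definition above) =====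
theorem findMaxGain_spec : Claim_equal_findMaxGain := by
  intro s x y ch1 ch2 _
  unfold Spec_findMaxGain findMaxGain findMaxGain_alt
  exact core_eq _ _ _ _ _
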